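-- pv_equiv track=rewrite | github.com/poureA/Vowel_families | Vowel_families.py | Vowel_families
-- ===== SOURCE A (Python) =====
-- def Vowel_families(lst)->list :
--     '''This function selects all words that have all the same vowels (in any order and/or number) as the first word,
--        including the first word.'''
--     c = 0
--     pattern_count = 0
--     pattern_vowels = ''
--     result = list()
--     for letter in lst[0] :
--         if letter in 'aeoiu' and letter not in pattern_vowels :
--             pattern_count += 1
--             pattern_vowels += letter
--     for word in lst[1:] :
--         for letter in word :
--             if letter in 'aeoiu' and letter in pattern_vowels :
--                 c += 1
--             else :
--                 if letter in 'aeoiu' and letter not in pattern_vowels :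
--                     c = 0
--                     break
--         if c >= pattern_count :
--             result.append(word)
--             c = 0
--         else :
--             c = 0
--     result.insert(0,lst[0])
--     return result
-- ===== SOURCE B (Python) =====
-- def Vowel_families(lst) -> list:
--     '''Select all words whose vowels match the first word's vowels, including the first word.'''
--     first = lst[0]
--     family = [v for v in 'aeoiu' if v in first]
--     foreign = [v for v in 'aeoiu' if v not in first]
--
--     def score(word):
--         if any(v in word for v in foreign):
--             return 0
--         return sum(word.count(v) for v in family)
--
--     return [first] + [w for w in lst[1:] if score(w) >= len(family)]
-- ===== Notes on version B (the rewrite author's own statement) =====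
-- stated objective: simpler
-- what changed: Replaces A's per-letter counter/break state machine and manual ordered-dedup pattern loop by a vowel-centric pass: the five vowels are classified once as family/foreign by membership in the first word, and each word is scored with sum(word.count(v)) over the family (0 if any foreign vowel occurs), kept iff the score reaches the family size; Pre_ only excludes the empty list, where A raises IndexError.
import Mathlib
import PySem

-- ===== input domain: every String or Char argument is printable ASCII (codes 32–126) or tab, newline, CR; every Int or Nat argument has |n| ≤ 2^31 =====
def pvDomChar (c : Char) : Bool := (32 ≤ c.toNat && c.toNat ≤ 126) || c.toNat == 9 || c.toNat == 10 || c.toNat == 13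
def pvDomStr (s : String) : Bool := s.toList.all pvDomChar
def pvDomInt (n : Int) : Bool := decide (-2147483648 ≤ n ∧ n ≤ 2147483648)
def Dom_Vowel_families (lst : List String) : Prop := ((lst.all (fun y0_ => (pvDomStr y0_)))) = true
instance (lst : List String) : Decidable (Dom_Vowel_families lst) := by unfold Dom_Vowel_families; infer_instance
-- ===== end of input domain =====

-- B replaces A's per-letter counter/break state machine (with a manual ordered dedup of the
-- first word's vowels) by a vowel-centric pass: the five vowels are classified once as
-- family/foreign by membership in the first word, and each word is scored by summing
-- word.count(v) over the family, 0 if any foreign vowel occurs; objective: simpler.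

-- the string literal 'aeoiu' both programs test membership in
def pvVowels : List Char := "aeoiu".toList

-- ===== PORT A =====
def Vowel_families (lst : List String) : List String :=
  match lst with
  | [] => []   -- lst[0] raises IndexError here; excluded by Pre_
  | w0 :: rest =>
    -- for letter in lst[0]: build (pattern_count, pattern_vowels)
    let p := w0.toList.foldl
      (fun (st : Int × List Char) letter =>
        if letter ∈ pvVowels ∧ letter ∉ st.2 then (st.1 + 1, st.2 ++ [letter]) else st)
      (0, [])
    let pattern_count := p.1
    let pattern_vowels := p.2
    -- for word in lst[1:], with c reset to 0 after each word (both branches reset it)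
    let result := rest.foldl
      (fun res word =>
        let c := (word.toList.foldl
          (fun (st : Int × Bool) letter =>
            if st.2 then st  -- loop already broken
            else if letter ∈ pvVowels ∧ letter ∈ pattern_vowels then (st.1 + 1, st.2)
            else if letter ∈ pvVowels ∧ letter ∉ pattern_vowels then (0, true)
            else st)
          (0, false)).1
        if c ≥ pattern_count then res ++ [word] else res)
      []
    w0 :: result  -- result.insert(0, lst[0])

-- ===== PORT B =====
def Vowel_families_alt (lst : List String) : List String :=
  match lst with
  | [] => []   -- lst[0] raises IndexError here; excluded by Pre_
  | first :: rest =>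
    let family := pvVowels.filter (fun v => first.toList.contains v)
    let foreign := pvVowels.filter (fun v => !first.toList.contains v)
    let score : String → Int := fun word =>
      if foreign.any (fun v => word.toList.contains v) then 0
      else ((family.map (fun v => word.toList.count v)).sum : Int)
    first :: rest.filter (fun w => decide (score w ≥ (family.length : Int)))

-- ===== PRECONDITION & SPEC =====
-- A evaluates lst[0]: it raises IndexError exactly on the empty list.
def Pre_Vowel_families (lst : List String) : Prop := lst ≠ []
instance (lst : List String) : Decidable (Pre_Vowel_families lst) := by unfold Pre_Vowel_families; infer_instance
def pvWitness_Vowel_families : List String := (["tea", "eat", "sit"])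

def Spec_Vowel_families (lst : List String) (out : List String) : Prop := out = Vowel_families_alt lst
instance (lst : List String) (out : List String) : Decidable (Spec_Vowel_families lst out) := by unfold Spec_Vowel_families; infer_instance

-- ===== CLAIM (what is proved, stated in full; the proofs are below) =====
def Claim_equal_Vowel_families : Prop := ∀ (lst : List String), Dom_Vowel_families lst → Pre_Vowel_families lst → Spec_Vowel_families lst (Vowel_families lst)

-- ===== LEMMAS AND PROOFS =====

-- A's pattern-building fold produces the set of the first word's vowels (first occurrences) and its size.
theorem patA_eq (l : List Char) : ∀ (s : List Char),
    l.foldl (fun (st : Int × List Char) letter =>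
        if letter ∈ pvVowels ∧ letter ∉ st.2 then (st.1 + 1, st.2 ++ [letter]) else st)
      ((s.length : Int), s)
    = (((((l.filter (fun x => decide (x ∈ pvVowels))).foldl PySem.Set.add s).length : Int)),
        (l.filter (fun x => decide (x ∈ pvVowels))).foldl PySem.Set.add s) := by
  induction l with
  | nil => intro s; simp
  | cons a t ih =>
    intro s
    by_cases hv : a ∈ pvVowels
    · by_cases hm : a ∈ s
      · simpa [hv, hm, PySem.Set.add, List.contains_iff_mem] using ih s
      · have := ih (s ++ [a])
        simpa [hv, hm, PySem.Set.add, List.contains_iff_mem] using this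
    · simp [hv, List.foldl_cons, ih s]

-- once A's inner loop has broken, the state is frozen
theorem inner_frozen (l : List Char) (pat : List Char) (st : Int × Bool) (h : st.2 = true) :
    l.foldl (fun (st : Int × Bool) letter =>
        if st.2 then st
        else if letter ∈ pvVowels ∧ letter ∈ pat then (st.1 + 1, st.2)
        else if letter ∈ pvVowels ∧ letter ∉ pat then (0, true)
        else st) st = st := by
  induction l with
  | nil => rfl
  | cons a t ih => simp [h, ih]

-- characterisation of A's inner loop result
theorem inner_eq (pat : List Char) (l : List Char) : ∀ (c : Int),
    l.foldl (fun (st : Int × Bool) letter =>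
        if st.2 then st
        else if letter ∈ pvVowels ∧ letter ∈ pat then (st.1 + 1, st.2)
        else if letter ∈ pvVowels ∧ letter ∉ pat then (0, true)
        else st) (c, false)
    = (if l.any (fun x => decide (x ∈ pvVowels) && !(decide (x ∈ pat))) then ((0 : Int), true)
       else (c + ((l.filter (fun x => decide (x ∈ pvVowels) && decide (x ∈ pat))).length : Int), false)) := by
  induction l with
  | nil => intro c; simp
  | cons a t ih =>
    intro c
    by_cases hv : a ∈ pvVowels
    · by_cases hm : a ∈ pat
      · have := ih (c + 1)
        simp only [List.foldl_cons, List.any_cons, List.filter_cons]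
        simp [hv, hm, this]
        split_ifs <;> simp <;> omega
      · simp only [List.foldl_cons, List.any_cons, List.filter_cons]
        simp [hv, hm, inner_frozen]
    · have := ih c
      simp only [List.foldl_cons, List.any_cons, List.filter_cons]
      simp [hv, this]

-- sum over a nodup list of an equality indicator is a membership indicator
theorem sum_indicator (c : Char) (F : List Char) (hF : F.Nodup) :
    (F.map (fun v => if v = c then 1 else 0)).sum = (if c ∈ F then 1 else 0) := by
  induction F with
  | nil => simp
  | cons a t ih =>
    rcases List.nodup_cons.mp hF with ⟨ha, ht⟩
    by_cases h : c = a
    · subst h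
      simp [ih ht, ha]
    · have h' : a ≠ c := fun hh => h hh.symm
      simp [h, h', ih ht]

-- counting occurrences vowel-by-vowel equals filtering by family membership
theorem sum_count (F : List Char) (hF : F.Nodup) (w : List Char) :
    (F.map (fun v => w.count v)).sum = (w.filter (fun x => decide (x ∈ F))).length := by
  induction w with
  | nil => simp
  | cons c t ih =>
    have hsplit : (F.map (fun v => (c :: t).count v)).sum
        = (F.map (fun v => t.count v)).sum + (F.map (fun v => if v = c then 1 else 0)).sum := by
      simp only [← List.sum_map_add]
      refine congrArg _ (List.map_congr_left ?_)
      intro v _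
      rw [List.count_cons]
      rcases eq_or_ne c v with rfl | h
      · simp
      · simp [h, h.symm]
    rw [hsplit, sum_indicator c F hF, ih]
    by_cases h : c ∈ F <;> simp [h]

-- ===== VERDICT (by name: the statement is the Claim_ definition above) =====
set_option maxRecDepth 10000 in
theorem Vowel_families_spec : Claim_equal_Vowel_families := by
  intro lst _ hpre
  unfold Spec_Vowel_families
  match lst with
  | [] => exact absurd rfl hpre
  | w0 :: rest =>
    unfold Vowel_families Vowel_families_alt
    have hp := patA_eq w0.toList []
    simp only [List.length_nil, Int.natCast_zero] at hp
    simp only [hp]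
    rw [PySem.List.foldl_append_ite_eq_filter, List.nil_append]
    -- names for the two vowel descriptions
    set P : List Char := (w0.toList.filter (fun x => decide (x ∈ pvVowels))).foldl PySem.Set.add []
      with hPdef
    have hPset : P = PySem.Set.ofList (w0.toList.filter (fun x => decide (x ∈ pvVowels))) := by
      rw [PySem.Set.ofList_eq_foldl]
    have hPmem : ∀ x, x ∈ P ↔ (x ∈ pvVowels ∧ x ∈ w0.toList) := by
      intro x
      rw [hPset, PySem.Set.mem_ofList, List.mem_filter]
      simp [and_comm]
    have hPnodup : P.Nodup := hPset ▸ PySem.Set.nodup_ofList _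
    have hVnodup : pvVowels.Nodup := by decide
    have hFnodup : (pvVowels.filter (fun v => w0.toList.contains v)).Nodup := hVnodup.filter _
    have hFmem : ∀ x, x ∈ pvVowels.filter (fun v => w0.toList.contains v) ↔
        (x ∈ pvVowels ∧ x ∈ w0.toList) := by
      intro x; simp [List.mem_filter]
    -- the pattern list and the family list have the same members, hence the same length
    have hlen : P.length = (pvVowels.filter (fun v => w0.toList.contains v)).length :=
      ((List.perm_ext_iff_of_nodup hPnodup hFnodup).mpr
        (fun x => (hPmem x).trans (hFmem x).symm)).length_eq
    refine congrArg _ (List.filter_congr ?_)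
    intro word _
    rw [inner_eq P word.toList 0]
    -- the foreign-vowel tests agree
    have hcond : word.toList.any (fun x => decide (x ∈ pvVowels) && !(decide (x ∈ P)))
        = (pvVowels.filter (fun v => !w0.toList.contains v)).any
            (fun v => word.toList.contains v) := by
      rw [Bool.eq_iff_iff]
      simp only [List.any_eq_true, List.mem_filter]
      constructor
      · rintro ⟨x, hx, h⟩
        simp only [Bool.and_eq_true, Bool.not_eq_true', decide_eq_true_eq,
          decide_eq_false_iff_not] at h
        refine ⟨x, ⟨h.1, ?_⟩, by simpa using hx⟩
        simp only [Bool.not_eq_true']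
        by_cases hw : x ∈ w0.toList
        · exact absurd ((hPmem x).mpr ⟨h.1, hw⟩) h.2
        · simpa using hw
      · rintro ⟨v, ⟨hv, hnv⟩, hw⟩
        refine ⟨v, by simpa using hw, ?_⟩
        simp only [Bool.not_eq_true'] at hnv
        have hnw : v ∉ w0.toList := by simpa using hnv
        simp only [Bool.and_eq_true, Bool.not_eq_true', decide_eq_true_eq,
          decide_eq_false_iff_not]
        exact ⟨hv, fun hP => hnw ((hPmem v).mp hP).2⟩
    -- the counts agree
    have hcount : (word.toList.filter (fun x => decide (x ∈ pvVowels) && decide (x ∈ P))).length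
        = ((pvVowels.filter (fun v => w0.toList.contains v)).map
            (fun v => word.toList.count v)).sum := by
      rw [sum_count _ hFnodup]
      refine congrArg _ (List.filter_congr ?_)
      intro x _
      rw [Bool.eq_iff_iff]
      simp only [Bool.and_eq_true, decide_eq_true_eq]
      constructor
      · rintro ⟨h1, h2⟩; exact (hFmem x).mpr ((hPmem x).mp h2)
      · intro h; rcases (hFmem x).mp h with ⟨h1, h2⟩; exact ⟨h1, (hPmem x).mpr ⟨h1, h2⟩⟩
    rw [hcond]
    split_ifs with h
    · simp only [decide_eq_decide]
      omega
    · simp only [zero_add, hcount, decide_eq_decide]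
      omega
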